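-- pv_equiv track=rewrite | github.com/ZeayW/Multimodal-fusion-based-Pre-routing-Timing-Prediction- | src/verilog_parser_asap7.py | update_netname
-- ===== SOURCE A (Python) =====
-- def update_netname(net_name,call_path,io2arg):
--
--     """
--     update the net name if it is connected to the outside netlist.
--         # check if the net is the input/output of the current module
--         #     if true, then update the net name
--
--     :param net_name: str
--                 name of the net
--     :param call_path: str
--                 the calling path of the module
--                     e.g., ChipTop/.../
--     :param io2arg: dict{str:(str,int)}
--                 {input/output net name: (port argument name, trace depth)}
--                 dictionary that maps the input/output ports to arguments in father/grandpa module
--                     trace_depth=1: father ; trace_back=2: grandpa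
--     :return:
--     """
--
--     # check if the net is the input/output of the current module
--     #     if true, then trace back along the call path,
--     #       and update the net name with the argname from father module,
--     #       then add the corresponding traced-back call path in the front.
--     #     if false, then simplify add the call path in the front.
--     #arg_name = net_name.replace('\\','')
--     arg_name = net_name
--     if io2arg is not None and \
--             io2arg.get(net_name, None) is not None:
--         _,arg_name, trace_depth = io2arg[net_name]
--         for _ in range(trace_depth):
--             if '/' in call_path:
--                 call_path = call_path[:call_path.rfind('/')]
--             else:
--                 call_path = ''
--     if call_path == '':
--         net_name = arg_name
--     else:
--         net_name = '{}/{}'.format(call_path, arg_name)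
--
--     return net_name
-- ===== SOURCE B (Python) =====
-- def update_netname(net_name, call_path, io2arg):
--     arg_name = net_name
--     if io2arg is not None:
--         hit = io2arg.get(net_name)
--         if hit is not None:
--             _, arg_name, trace_depth = hit
--             parts = call_path.split('/')
--             keep = max(0, len(parts) - trace_depth)
--             call_path = '/'.join(parts[:keep])
--     return arg_name if call_path == '' else '{}/{}'.format(call_path, arg_name)
-- ===== Notes on version B (the rewrite author's own statement) =====
-- stated objective: simpler
-- what changed: The per-level loop that repeatedly searches for the last '/' with rfind and truncates is replaced by a single split('/'), a clamped slice keeping len(parts)-trace_depth segments, and one '/'.join.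
import Mathlib
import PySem

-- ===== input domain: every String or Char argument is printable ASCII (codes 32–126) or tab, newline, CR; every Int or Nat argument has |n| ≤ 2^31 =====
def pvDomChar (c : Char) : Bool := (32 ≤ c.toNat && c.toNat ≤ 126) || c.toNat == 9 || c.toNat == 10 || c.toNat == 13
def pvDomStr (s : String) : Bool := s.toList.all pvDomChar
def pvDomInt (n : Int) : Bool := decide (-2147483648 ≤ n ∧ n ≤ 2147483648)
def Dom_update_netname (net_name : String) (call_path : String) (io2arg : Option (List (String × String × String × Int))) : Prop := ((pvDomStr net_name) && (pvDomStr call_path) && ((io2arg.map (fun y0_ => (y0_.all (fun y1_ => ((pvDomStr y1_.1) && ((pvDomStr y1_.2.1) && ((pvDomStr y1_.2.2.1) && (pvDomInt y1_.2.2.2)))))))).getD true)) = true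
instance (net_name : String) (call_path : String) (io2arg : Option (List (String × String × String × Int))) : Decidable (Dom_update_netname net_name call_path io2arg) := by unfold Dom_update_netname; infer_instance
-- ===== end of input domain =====

-- B replaces A's repeated rfind-truncation loop by one split('/') / slice / join; return value only, no mutation.
-- ===== PORT A =====
-- the body of A's 'for _ in range(trace_depth)' loop, iterated
def pvLoopA : List Char → Nat → List Char
  | cp, 0 => cp
  | cp, Nat.succ n =>
    if PySem.Chars.isIn ['/'] cp then
      pvLoopA (PySem.Chars.slice cp none (some (PySem.Chars.rfind cp ['/']))) n
    else
      pvLoopA [] n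

def update_netname (net_name : String) (call_path : String) (io2arg : Option (List (String × String × String × Int))) : String :=
  let r : List Char × List Char :=
    match io2arg with
    | none => (net_name.toList, call_path.toList)
    | some d =>
      match PySem.Dict.get? (PySem.Dict.mk d) net_name with
      | none => (net_name.toList, call_path.toList)
      | some v =>
        -- _, arg_name, trace_depth = io2arg[net_name]; then the range(trace_depth) loop
        (v.2.1.toList, pvLoopA call_path.toList v.2.2.toNat)
  if r.2 = [] then String.ofList r.1 else String.ofList (r.2 ++ '/' :: r.1)

-- ===== PORT B =====
def update_netname_alt (net_name : String) (call_path : String) (io2arg : Option (List (String × String × String × Int))) : String :=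
  let r : List Char × List Char :=
    match io2arg with
    | none => (net_name.toList, call_path.toList)
    | some d =>
      match PySem.Dict.get? (PySem.Dict.mk d) net_name with
      | none => (net_name.toList, call_path.toList)
      | some v =>
        -- parts = call_path.split('/'); keep = max(0, len(parts) - trace_depth); '/'.join(parts[:keep])
        let parts := PySem.Chars.splitOn call_path.toList ['/']
        let keep : Int := max 0 ((parts.length : Int) - v.2.2)
        (v.2.1.toList, PySem.Chars.join ['/'] (PySem.List.slice parts none (some keep)))
  if r.2 = [] then String.ofList r.1 else String.ofList (r.2 ++ '/' :: r.1)

-- ===== PRECONDITION & SPEC =====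
def Spec_update_netname (net_name : String) (call_path : String) (io2arg : Option (List (String × String × String × Int))) (out : String) : Prop := out = update_netname_alt net_name call_path io2arg
instance (net_name : String) (call_path : String) (io2arg : Option (List (String × String × String × Int))) (out : String) : Decidable (Spec_update_netname net_name call_path io2arg out) := by unfold Spec_update_netname; infer_instance

-- ===== CLAIM (what is proved, stated in full; the proofs are below) =====
def Claim_equal_update_netname : Prop := ∀ (net_name : String) (call_path : String) (io2arg : Option (List (String × String × String × Int))), Dom_update_netname net_name call_path io2arg → Spec_update_netname net_name call_path io2arg (update_netname net_name call_path io2arg)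

-- ===== LEMMAS AND PROOFS =====

theorem pv_prefix_slash (l : List Char) : (['/'].isPrefixOf l = true) ↔ ∃ t, l = '/' :: t := by
  cases l with
  | nil => simp [List.isPrefixOf]
  | cons c t =>
    constructor
    · intro h
      have : c = '/' := by
        have := (List.cons_prefix_cons.mp (List.isPrefixOf_iff_prefix.mp h)).1
        exact this.symm
      exact ⟨t, by rw [this]⟩
    · rintro ⟨t', ht⟩
      injection ht with h1 h2
      subst h1; subst h2
      exact List.isPrefixOf_iff_prefix.mpr (List.cons_prefix_cons.mpr ⟨rfl, List.nil_prefix⟩)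

theorem pv_modifyHead_fun_id {α : Type} (l : List α) : l.modifyHead (fun x => x) = l := by
  cases l <;> simp

theorem pv_modifyHead_congr {α : Type} {f g : α → α} (l : List α) (h : ∀ x, f x = g x) :
    l.modifyHead f = l.modifyHead g := by
  cases l with
  | nil => rfl
  | cons x t => simp [h x]

theorem pv_modifyHead_append {α : Type} (f : α → α) (xs ys : List α) (h : xs ≠ []) :
    (xs ++ ys).modifyHead f = xs.modifyHead f ++ ys := by
  cases xs with
  | nil => exact absurd rfl h
  | cons x t => simp

theorem pv_splitOn_cons_slash (t : List Char) : ('/' :: t).splitOn '/' = [] :: t.splitOn '/' := by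
  simp [List.splitOn, List.splitOnP_cons]

theorem pv_splitOn_cons (c : Char) (t : List Char) (h : ¬ c = '/') :
    (c :: t).splitOn '/' = (t.splitOn '/').modifyHead (c :: ·) := by
  simp [List.splitOn, List.splitOnP_cons, h]

theorem pv_go_spec (fuel : Nat) : ∀ (l cur : List Char) (acc : List (List Char)), l.length < fuel →
    PySem.Chars.splitOn.go ['/'] fuel l cur acc
      = acc.reverse ++ (l.splitOn '/').modifyHead (cur.reverse ++ ·) := by
  induction fuel with
  | zero => intro l cur acc h; omega
  | succ n ih =>
    intro l cur acc h
    cases l with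
    | nil =>
      simp [PySem.Chars.splitOn.go, List.splitOn, List.splitOnP, List.splitOnP.go]
    | cons c rest =>
      by_cases hc : c = '/'
      · subst hc
        have hp : List.isPrefixOf ['/'] ('/' :: rest) = true := by
          rw [pv_prefix_slash]; exact ⟨rest, rfl⟩
        rw [PySem.Chars.splitOn.go, if_pos hp]
        simp only [List.length_singleton, List.drop_one, List.tail_cons]
        rw [ih rest [] _ (by simp at h; omega)]
        rw [pv_splitOn_cons_slash]
        simp [pv_modifyHead_fun_id]
      · have hp : ¬ List.isPrefixOf ['/'] (c :: rest) = true := by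
          rw [pv_prefix_slash]; rintro ⟨t, ht⟩; simp only [List.cons.injEq] at ht; exact hc ht.1
        rw [PySem.Chars.splitOn.go, if_neg hp]
        rw [ih rest (c :: cur) _ (by simp at h; omega)]
        rw [pv_splitOn_cons c rest hc]
        rw [List.modifyHead_modifyHead]
        congr 1
        exact pv_modifyHead_congr _ (fun x => by simp)

theorem pv_chars_splitOn_eq (cs : List Char) :
    PySem.Chars.splitOn cs ['/'] = cs.splitOn '/' := by
  rw [PySem.Chars.splitOn, pv_go_spec (cs.length + 1) cs [] [] (by omega)]
  simp [pv_modifyHead_fun_id]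

theorem pv_isIn_slash (cs : List Char) : PySem.Chars.isIn ['/'] cs = true ↔ '/' ∈ cs := by
  rw [PySem.Chars.isIn, bne_iff_ne, ne_eq, PySem.Chars.find_eq_neg_one_iff, not_not,
    List.singleton_infix_iff]

theorem pv_last_slash (cs : List Char) (h : '/' ∈ cs) :
    ∃ a b, cs = a ++ '/' :: b ∧ '/' ∉ b := by
  induction cs with
  | nil => cases h
  | cons c t ih =>
    by_cases ht : '/' ∈ t
    · obtain ⟨a, b, rfl, hb⟩ := ih ht
      exact ⟨c :: a, b, rfl, hb⟩
    · have hc : c = '/' := by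
        rcases List.mem_cons.mp h with h1 | h1
        · exact h1.symm
        · exact absurd h1 ht
      exact ⟨[], t, by rw [hc]; rfl, ht⟩

theorem pv_rfind_go (a b : List Char) (hb : '/' ∉ b) :
    ∀ k, a.length ≤ k → k ≤ (a ++ '/' :: b).length →
      PySem.Chars.rfind.go (a ++ '/' :: b) ['/'] k = (a.length : Int) := by
  intro k
  induction k with
  | zero =>
    intro h1 _
    have ha : a = [] := List.eq_nil_of_length_eq_zero (Nat.le_zero.mp h1)
    subst ha
    rw [PySem.Chars.rfind.go]
    simp
  | succ j ih =>
    intro h1 h2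
    rw [PySem.Chars.rfind.go]
    by_cases he : a.length = j + 1
    · have hp : List.isPrefixOf ['/'] (List.drop (j + 1) (a ++ '/' :: b)) = true := by
        rw [pv_prefix_slash]
        refine ⟨b, ?_⟩
        rw [← he, List.drop_append_of_le_length (le_refl _), List.drop_length]
        simp
      rw [if_pos hp, he]
    · have hlt : a.length < j + 1 := lt_of_le_of_ne h1 he
      have hp : ¬ List.isPrefixOf ['/'] (List.drop (j + 1) (a ++ '/' :: b)) = true := by
        rw [pv_prefix_slash]
        rintro ⟨t, ht⟩
        have hm : '/' ∈ List.drop (j + 1) (a ++ '/' :: b) := by rw [ht]; exact List.mem_cons_self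
        have hd : List.drop (j + 1) (a ++ '/' :: b) = List.drop (j - a.length) b := by
          rw [List.drop_append, List.drop_eq_nil_of_le (by omega)]
          have h3 : j + 1 - a.length = (j - a.length) + 1 := by omega
          rw [h3]
          simp
        rw [hd] at hm
        exact hb (List.mem_of_mem_drop hm)
      rw [if_neg hp]
      exact ih (Nat.le_of_lt_succ hlt) (le_trans (Nat.le_succ j) h2)

theorem pv_rfind_eq (a b : List Char) (hb : '/' ∉ b) :
    PySem.Chars.rfind (a ++ '/' :: b) ['/'] = (a.length : Int) := by
  rw [PySem.Chars.rfind]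
  exact pv_rfind_go a b hb _ (by simp) (le_refl _)

theorem pv_splitOn_no_slash (b : List Char) (hb : '/' ∉ b) : b.splitOn '/' = [b] := by
  induction b with
  | nil => rfl
  | cons c t ih =>
    have hc : ¬ c = '/' := fun h => hb (h ▸ List.mem_cons_self)
    rw [pv_splitOn_cons c t hc, ih (fun h => hb (List.mem_cons_of_mem c h))]
    rfl

theorem pv_splitOn_append (a b : List Char) (hb : '/' ∉ b) :
    (a ++ '/' :: b).splitOn '/' = a.splitOn '/' ++ [b] := by
  induction a with
  | nil =>
    rw [List.nil_append, pv_splitOn_cons_slash, pv_splitOn_no_slash b hb]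
    rfl
  | cons c a' ih =>
    by_cases hc : c = '/'
    · subst hc
      rw [List.cons_append, pv_splitOn_cons_slash, pv_splitOn_cons_slash, ih]
      rfl
    · rw [List.cons_append, pv_splitOn_cons c _ hc, pv_splitOn_cons c a' hc, ih]
      exact pv_modifyHead_append _ _ _ (by rw [List.splitOn]; exact List.splitOnP_ne_nil _ _)

-- the truncation loop of A computes '/'-join of all but the last n segments
theorem pv_loopA_eq (n : Nat) : ∀ cs : List Char,
    pvLoopA cs n = ['/'].intercalate ((cs.splitOn '/').take ((cs.splitOn '/').length - n)) := by
  induction n with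
  | zero =>
    intro cs
    rw [pvLoopA, Nat.sub_zero, List.take_length, List.intercalate_splitOn]
  | succ n ih =>
    intro cs
    by_cases h : PySem.Chars.isIn ['/'] cs = true
    · obtain ⟨a, b, rfl, hb⟩ := pv_last_slash cs ((pv_isIn_slash cs).mp h)
      rw [pvLoopA, if_pos h, PySem.Chars.slice_eq_listSlice,
        pv_rfind_eq a b hb, PySem.List.slice_to _ (by positivity)]
      have hta : List.take ((a.length : Int)).toNat (a ++ '/' :: b) = a := by
        rw [Int.toNat_natCast]; exact List.take_left
      rw [hta, ih a, pv_splitOn_append a b hb]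
      have hlen : (a.splitOn '/' ++ [b]).length = (a.splitOn '/').length + 1 := by simp
      rw [hlen]
      have : (a.splitOn '/').length + 1 - (n + 1) = (a.splitOn '/').length - n := by omega
      rw [this, List.take_append_of_le_length (by omega)]
    · have hb : '/' ∉ cs := fun hm => h ((pv_isIn_slash cs).mpr hm)
      rw [pvLoopA, if_neg h, ih [], pv_splitOn_no_slash cs hb]
      cases n with
      | zero => rfl
      | succ m =>
        rw [show (List.splitOn '/' ([] : List Char)).length - (m + 1) = 0 from by simp,
          show ([cs] : List (List Char)).length - (m + 1 + 1) = 0 from by simp]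
        rfl

-- A's loop, run trace_depth times, equals B's split/slice/join expression
theorem pv_trunc_eq (cp : List Char) (d : Int) :
    pvLoopA cp d.toNat
      = PySem.Chars.join ['/'] (PySem.List.slice (PySem.Chars.splitOn cp ['/']) none
          (some (max 0 (((PySem.Chars.splitOn cp ['/']).length : Int) - d)))) := by
  rw [pv_chars_splitOn_eq, PySem.Chars.join,
    PySem.List.slice_to _ (le_max_left 0 _), pv_loopA_eq]
  congr 1
  rw [List.take_eq_take_iff]
  omega

-- ===== VERDICT (by name: the statement is the Claim_ definition above) =====
theorem update_netname_spec : Claim_equal_update_netname := by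
  unfold Claim_equal_update_netname
  intro net_name call_path io2arg _
  unfold Spec_update_netname update_netname update_netname_alt
  cases io2arg with
  | none => rfl
  | some d =>
    cases hget : PySem.Dict.get? (PySem.Dict.mk d) net_name with
    | none => simp only [hget]
    | some v =>
      simp only [hget]
      rw [pv_trunc_eq]
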